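-- pv_equiv track=rewrite | github.com/dan4ielo/lab_and_study | projects/chess_engine/chess/movement.py | right_down
-- ===== SOURCE A (Python) =====
-- valid_files = [ord('a'), ord('b'), ord('c'),
--                ord('d'), ord('e'), ord('f'),
--                ord('g'), ord('h'), 0]
--
-- valid_ranks = [1, 2, 3, 4, 5, 6, 7, 8, 0]   # The 0 are used for cases where the possible moves
--
-- def right_down(loc):
--     moves = []
--     file = loc[0]
--     rank = loc[1]
--     while ord(file) in valid_files and rank in valid_ranks:
--         move = (file, rank)
--         file = chr(ord(file) + 1)
--         rank -= 1
--         moves.append(move)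
--     moves = [move for move in moves if 0 not in move]
--     return moves
-- ===== SOURCE B (Python) =====
-- def right_down(loc):
--     file, rank = loc
--     if len(file) != 1:
--         return []
--     c = ord(file)
--     if not (97 <= c <= 104 and 1 <= rank <= 8):
--         return []
--     n = min(8 - (c - 97), rank)
--     return [(chr(c + i), rank - i) for i in range(n)]
-- ===== Notes on version B (the rewrite author's own statement) =====
-- stated objective: simpler
-- what changed: B replaces A's sentinel-padded while-walk (append 0-sentinel squares, then filter them out in a second pass) with a single guarded closed-form generation: validate the start square, compute the diagonal length n = min(8-(ord(file)-97), rank), and emit the n squares directly.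
import Mathlib
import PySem

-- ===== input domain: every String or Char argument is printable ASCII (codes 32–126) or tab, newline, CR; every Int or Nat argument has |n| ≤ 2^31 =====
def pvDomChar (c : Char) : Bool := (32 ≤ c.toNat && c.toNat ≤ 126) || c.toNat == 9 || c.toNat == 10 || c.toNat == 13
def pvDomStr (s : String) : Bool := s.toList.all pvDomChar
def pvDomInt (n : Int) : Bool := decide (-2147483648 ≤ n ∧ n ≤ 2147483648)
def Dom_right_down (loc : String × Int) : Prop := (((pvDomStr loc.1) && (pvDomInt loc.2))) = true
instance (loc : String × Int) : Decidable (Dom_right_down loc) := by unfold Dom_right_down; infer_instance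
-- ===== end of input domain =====

-- B replaces A's sentinel-padded walk-then-filter by a guarded closed-form generation (objective: simpler).

-- ===== PORT A =====
def valid_files : List Int := [97, 98, 99, 100, 101, 102, 103, 104, 0]
def valid_ranks : List Int := [1, 2, 3, 4, 5, 6, 7, 8, 0]

-- ord(s): exact for one-char strings; none is where Python raises TypeError (excluded by Pre_)
def pyOrd? (s : String) : Option Int :=
  match s.toList with
  | [c] => some (c.toNat : Int)
  | _ => none

-- the while loop of A; the fuel only makes the recursion structural: the body runs only while
-- rank ∈ valid_ranks (so 0 ≤ rank ≤ 8) and decreases rank each step, hence at most 9 iterations,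
-- so fuel 10 is never exhausted.
def rdLoop : Nat → String → Int → List (String × Int) → List (String × Int)
  | 0, _, _, moves => moves
  | fuel + 1, file, rank, moves =>
    match pyOrd? file with
    | none => moves  -- Python raises here; unreachable under Pre_
    | some o =>
      if o ∈ valid_files ∧ rank ∈ valid_ranks then
        rdLoop fuel (String.ofList [Char.ofNat (o + 1).toNat]) (rank - 1) (moves ++ [(file, rank)])
      else moves

def right_down (loc : String × Int) : List (String × Int) :=
  let moves := rdLoop 10 loc.1 loc.2 []
  -- '0 not in move': the file component is a str, never equal to 0, so the test is rank ≠ 0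
  moves.filter (fun m => !(m.2 == 0))

-- ===== PORT B =====
def right_down_alt (loc : String × Int) : List (String × Int) :=
  match loc.1.toList with
  | [f] =>
    let c : Int := (f.toNat : Int)
    if 97 ≤ c ∧ c ≤ 104 ∧ 1 ≤ loc.2 ∧ loc.2 ≤ 8 then
      let n := min (8 - (c - 97)) loc.2
      (List.range n.toNat).map (fun (i : Nat) => (String.ofList [Char.ofNat ((c + (i : Int)).toNat)], loc.2 - (i : Int)))
    else []
  | _ => []

-- ===== PRECONDITION & SPEC =====
-- Pre_ excludes exactly the inputs where A raises TypeError: file strings of length ≠ 1.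
def Pre_right_down (loc : String × Int) : Prop := loc.1.toList.length = 1
instance (loc : String × Int) : Decidable (Pre_right_down loc) := by unfold Pre_right_down; infer_instance
def pvWitness_right_down : (String × Int) := ("a", 3)

def Spec_right_down (loc : String × Int) (out : List (String × Int)) : Prop := out = right_down_alt loc
instance (loc : String × Int) (out : List (String × Int)) : Decidable (Spec_right_down loc out) := by unfold Spec_right_down; infer_instance

-- ===== CLAIM (what is proved, stated in full; the proofs are below) =====
def Claim_equal_right_down : Prop := ∀ (loc : String × Int), Dom_right_down loc → Pre_right_down loc → Spec_right_down loc (right_down loc)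

-- ===== LEMMAS AND PROOFS =====

-- number of iterations A's loop performs from file code c (97..104) and rank r (0..8)
def rdSteps (c : Nat) (r : Int) : Nat := min (105 - c) (r.toNat + 1)

lemma char_toNat_ofNat (c : Nat) (h : c < 55296) : (Char.ofNat c).toNat = c := by
  have hv : Nat.isValidChar c := Or.inl h
  rw [Char.ofNat, dif_pos hv]
  simp [Char.ofNatAux, Char.toNat]

-- one failing loop test returns the accumulator, for any fuel
lemma rdLoop_stop (fuel : Nat) (s : String) (r : Int) (acc : List (String × Int)) (o : Int)
    (hpy : pyOrd? s = some o) (h : ¬(o ∈ valid_files ∧ r ∈ valid_ranks)) :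
    rdLoop fuel s r acc = acc := by
  cases fuel with
  | zero => rfl
  | succ n =>
    simp only [rdLoop, hpy]
    rw [if_neg h]

lemma rdLoop_run (fuel : Nat) : ∀ (c : Nat) (r : Int) (acc : List (String × Int)),
    97 ≤ c → c ≤ 104 → 0 ≤ r → r ≤ 8 → rdSteps c r ≤ fuel →
    rdLoop fuel (String.ofList [Char.ofNat c]) r acc
      = acc ++ (List.range (rdSteps c r)).map
          (fun i => (String.ofList [Char.ofNat (c + i)], r - (i : Int))) := by
  induction fuel with
  | zero =>
    intro c r acc h1 h2 hr0 hr8 hf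
    exfalso; unfold rdSteps at hf; omega
  | succ fuel ih =>
    intro c r acc h1 h2 hr0 hr8 hf
    have hval : (Char.ofNat c).toNat = c := char_toNat_ofNat c (by omega)
    have hpy : pyOrd? (String.ofList [Char.ofNat c]) = some (c : Int) := by
      simp [pyOrd?, String.toList_ofList, hval]
    have hcmem : (c : Int) ∈ valid_files := by simp [valid_files]; omega
    have hrmem : r ∈ valid_ranks := by simp [valid_ranks]; omega
    have hsucc : ((c : Int) + 1).toNat = c + 1 := by omega
    simp only [rdLoop, hpy, if_pos (And.intro hcmem hrmem), hsucc]
    by_cases hend : c = 104 ∨ r = 0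
    · have hval2 : (Char.ofNat (c + 1)).toNat = c + 1 := char_toNat_ofNat _ (by omega)
      have hpy2 : pyOrd? (String.ofList [Char.ofNat (c + 1)]) = some ((c + 1 : Nat) : Int) := by
        simp [pyOrd?, String.toList_ofList, hval2]
      have hneg : ¬(((c + 1 : Nat) : Int) ∈ valid_files ∧ (r - 1) ∈ valid_ranks) := by
        simp [valid_files, valid_ranks]
        rcases hend with h | h <;> intros <;> omega
      rw [rdLoop_stop fuel _ _ _ _ hpy2 hneg]
      have hone : rdSteps c r = 1 := by unfold rdSteps; rcases hend with h | h <;> omega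
      rw [hone]
      simp
    · push Not at hend
      rw [ih (c + 1) (r - 1) _ (by omega) (by omega) (by omega) (by omega)
          (by unfold rdSteps at hf ⊢; omega)]
      have hS : rdSteps c r = rdSteps (c + 1) (r - 1) + 1 := by
        unfold rdSteps; omega
      rw [hS, List.range_succ_eq_map, List.map_cons, List.map_map,
        List.append_assoc, List.singleton_append]
      congr 1
      congr 1
      · simp
      · apply List.map_congr_left
        intro i _
        refine Prod.ext ?_ ?_
        · show String.ofList [Char.ofNat (c + 1 + i)] = String.ofList [Char.ofNat (c + (i + 1))]
          have : c + 1 + i = c + (i + 1) := by omega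
          rw [this]
        · show r - 1 - (i : Int) = r - ((i + 1 : Nat) : Int)
          push_cast; ring

-- filtering out the single 0-rank sentinel square leaves min(105-c, r) squares
lemma rdFilter (c : Nat) (r : Int) (h1 : 97 ≤ c) (h2 : c ≤ 104) (hr0 : 0 ≤ r) :
    ((List.range (rdSteps c r)).map
        (fun i => (String.ofList [Char.ofNat (c + i)], r - (i : Int)))).filter
      (fun m => !(m.2 == 0))
    = (List.range (min (105 - c) r.toNat)).map
        (fun i => (String.ofList [Char.ofNat (c + i)], r - (i : Int))) := by
  rw [List.filter_map]
  congr 1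
  unfold rdSteps
  by_cases hle : 105 - c ≤ r.toNat
  · rw [min_eq_left (by omega), min_eq_left hle]
    apply List.filter_eq_self.mpr
    intro i hi
    simp only [List.mem_range] at hi
    have hne : r - (i : Int) ≠ 0 := by omega
    simp [hne]
  · rw [min_eq_right (by omega), min_eq_right (by omega), List.range_succ,
      List.filter_append]
    have h1' : (List.range r.toNat).filter
        ((fun m => !(m.2 == 0)) ∘ fun i => (String.ofList [Char.ofNat (c + i)], r - (i : Int)))
        = List.range r.toNat := by
      apply List.filter_eq_self.mpr
      intro i hi
      simp only [List.mem_range] at hi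
      have hne : r - (i : Int) ≠ 0 := by omega
      simp [hne]
    have h2' : ([r.toNat]).filter
        ((fun m => !(m.2 == 0)) ∘ fun i => (String.ofList [Char.ofNat (c + i)], r - (i : Int)))
        = [] := by
      simp [Function.comp]
      omega
    rw [h1', h2', List.append_nil]

-- evaluate B's match on a one-char string
lemma alt_eval (f : Char) (r : Int) :
    right_down_alt (String.ofList [f], r)
      = (if 97 ≤ ((f.toNat : Int)) ∧ (f.toNat : Int) ≤ 104 ∧ 1 ≤ r ∧ r ≤ 8 then
          (List.range (min (8 - ((f.toNat : Int) - 97)) r).toNat).map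
            (fun (i : Nat) => (String.ofList [Char.ofNat (((f.toNat : Int) + (i : Int)).toNat)],
              r - (i : Int)))
        else []) := by
  simp only [right_down_alt, String.toList_ofList]

-- ===== VERDICT (by name: the statement is the Claim_ definition above) =====
set_option maxHeartbeats 1000000 in
theorem right_down_spec : Claim_equal_right_down := by
  intro loc hdom hpre
  obtain ⟨s, r⟩ := loc
  unfold Spec_right_down
  obtain ⟨f, hf⟩ : ∃ f, s.toList = [f] := by
    unfold Pre_right_down at hpre
    cases hs : s.toList with
    | nil => rw [hs] at hpre; simp at hpre
    | cons a t =>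
      cases t with
      | nil => exact ⟨a, rfl⟩
      | cons b t' => rw [hs] at hpre; simp at hpre
  have hse : s = String.ofList [f] := by rw [← hf, String.ofList_toList]
  subst hse
  have hdc : pvDomChar f = true := by
    unfold Dom_right_down pvDomStr at hdom
    simp only [String.toList_ofList, List.all_cons, List.all_nil, Bool.and_true,
      Bool.and_eq_true] at hdom
    exact hdom.1
  have hcb : 9 ≤ f.toNat ∧ f.toNat ≤ 126 := by
    simp only [pvDomChar, Bool.or_eq_true, Bool.and_eq_true, decide_eq_true_eq,
      beq_iff_eq] at hdc
    omega
  have hshow : right_down (String.ofList [f], r)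
      = (rdLoop 10 (String.ofList [f]) r []).filter (fun m => !(m.2 == 0)) := rfl
  have hpyf : pyOrd? (String.ofList [f]) = some ((f.toNat : Int)) := by
    simp [pyOrd?, String.toList_ofList]
  rw [hshow, alt_eval]
  by_cases hcr : 97 ≤ f.toNat ∧ f.toNat ≤ 104
  · by_cases hr : 0 ≤ r ∧ r ≤ 8
    · have hrun := rdLoop_run 10 f.toNat r [] hcr.1 hcr.2 hr.1 hr.2
        (by unfold rdSteps; omega)
      rw [Char.ofNat_toNat] at hrun
      rw [hrun, List.nil_append, rdFilter f.toNat r hcr.1 hcr.2 hr.1]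
      by_cases hr1 : 1 ≤ r
      · rw [if_pos ⟨by exact_mod_cast hcr.1, by exact_mod_cast hcr.2, hr1, hr.2⟩]
        have hn : (min (8 - ((f.toNat : Int) - 97)) r).toNat = min (105 - f.toNat) r.toNat := by
          omega
        rw [hn]
        apply List.map_congr_left
        intro i _
        refine Prod.ext ?_ ?_
        · show String.ofList [Char.ofNat (f.toNat + i)]
            = String.ofList [Char.ofNat (((f.toNat : Int) + (i : Int)).toNat)]
          have : ((f.toNat : Int) + (i : Int)).toNat = f.toNat + i := by omega
          rw [this]
        · rfl
      · have hr0 : r = 0 := by omega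
        rw [if_neg (by intro h; exact hr1 h.2.2.1)]
        subst hr0
        simp
    · -- rank out of range: A's loop test fails at once, B's guard fails
      have hnr : ¬ (((f.toNat : Int)) ∈ valid_files ∧ r ∈ valid_ranks) := by
        intro h
        have := h.2
        simp [valid_ranks] at this
        omega
      rw [rdLoop_stop 10 _ _ _ _ hpyf hnr]
      rw [if_neg (by intro h; exact hr ⟨by omega, h.2.2.2⟩)]
      simp
  · -- file out of a..h: A's loop test fails at once (its code is not 0 either, by Dom), B's guard fails
    have hnc : ¬ (((f.toNat : Int)) ∈ valid_files ∧ r ∈ valid_ranks) := by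
      intro h
      have := h.1
      simp [valid_files] at this
      omega
    rw [rdLoop_stop 10 _ _ _ _ hpyf hnc]
    rw [if_neg (by intro h; exact hcr ⟨by exact_mod_cast h.1, by exact_mod_cast h.2.1⟩)]
    simp
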